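-- pv_equiv track=rewrite | github.com/openai/evals | evals/elsuite/cant_do_that_anymore/chess/utils.py | get_path_between_coords
-- ===== SOURCE A (Python) =====
-- from typing import Sequence
--
-- def get_path_between_coords(
--     start_coord: Sequence[int], target_coord: Sequence[int]
-- ) -> Sequence[Sequence[int]]:
--     # Unpack the start and end points
--     x1, y1 = start_coord
--     x2, y2 = target_coord
--
--     # Determine the steps to take in each direction
--     dx = 1 if x2 > x1 else -1 if x2 < x1 else 0
--     dy = 1 if y2 > y1 else -1 if y2 < y1 else 0
--
--     path = [(x1, y1)]
--     while (x1, y1) != (x2, y2):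
--         if x1 != x2:
--             x1 += dx
--         if y1 != y2:
--             y1 += dy
--         path.append((x1, y1))
--
--     path = path[1:-1]
--     return path
-- ===== SOURCE B (Python) =====
-- def get_path_between_coords(start_coord, target_coord):
--     x1, y1 = start_coord
--     x2, y2 = target_coord
--     ax = abs(x2 - x1)
--     ay = abs(y2 - y1)
--     dx = (x2 > x1) - (x2 < x1)
--     dy = (y2 > y1) - (y2 < y1)
--     n = max(ax, ay)
--     return [(x1 + dx * min(i, ax), y1 + dy * min(i, ay)) for i in range(1, n)]
-- ===== Notes on version B (the rewrite author's own statement) =====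
-- stated objective: simpler
-- what changed: Replaces A's incremental while loop that mutates (x1,y1), appends each cell and finally slices off the endpoints with a closed-form list comprehension that produces each intermediate cell directly by index: (x1+dx*min(i,|x2-x1|), y1+dy*min(i,|y2-y1|)) for i in range(1, max(|x2-x1|,|y2-y1|)).
import Mathlib
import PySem

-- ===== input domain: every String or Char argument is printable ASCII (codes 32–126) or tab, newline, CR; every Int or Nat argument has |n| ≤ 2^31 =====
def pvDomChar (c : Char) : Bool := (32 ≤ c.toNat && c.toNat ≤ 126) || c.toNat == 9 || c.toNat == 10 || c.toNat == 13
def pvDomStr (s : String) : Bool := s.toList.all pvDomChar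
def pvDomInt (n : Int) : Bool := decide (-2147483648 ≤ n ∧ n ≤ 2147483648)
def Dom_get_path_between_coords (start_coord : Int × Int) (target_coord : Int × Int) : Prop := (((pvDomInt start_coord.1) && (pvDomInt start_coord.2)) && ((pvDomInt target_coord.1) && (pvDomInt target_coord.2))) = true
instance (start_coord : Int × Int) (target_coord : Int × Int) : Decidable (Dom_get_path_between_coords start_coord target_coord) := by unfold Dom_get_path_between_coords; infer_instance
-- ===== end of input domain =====

-- B replaces A's incremental while-loop-and-slice with a direct closed-form list
-- comprehension over the step index (objective: simpler).

-- ===== PORT A =====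
-- A's while loop: appends one cell per iteration until (x1,y1) reaches (x2,y2).
-- Fuel |x2-x1| + |y2-y1| bounds the number of iterations (each iteration moves at
-- least one coordinate one unit toward its target), so the fuel never runs out.
def pvLoopA (x2 y2 dx dy : Int) : Nat → Int → Int → List (Int × Int)
  | 0, _, _ => []
  | fuel + 1, x1, y1 =>
    if (x1, y1) = (x2, y2) then []
    else
      let x1' := if x1 ≠ x2 then x1 + dx else x1
      let y1' := if y1 ≠ y2 then y1 + dy else y1
      (x1', y1') :: pvLoopA x2 y2 dx dy fuel x1' y1'

def get_path_between_coords (start_coord : Int × Int) (target_coord : Int × Int) : List (Int × Int) :=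
  let x1 := start_coord.1
  let y1 := start_coord.2
  let x2 := target_coord.1
  let y2 := target_coord.2
  let dx : Int := if x2 > x1 then 1 else if x2 < x1 then -1 else 0
  let dy : Int := if y2 > y1 then 1 else if y2 < y1 then -1 else 0
  let path : List (Int × Int) :=
    (x1, y1) :: pvLoopA x2 y2 dx dy ((x2 - x1).natAbs + (y2 - y1).natAbs) x1 y1
  PySem.List.slice path (some 1) (some (-1))    -- path[1:-1]

-- ===== PORT B =====
def get_path_between_coords_alt (start_coord : Int × Int) (target_coord : Int × Int) : List (Int × Int) :=
  let x1 := start_coord.1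
  let y1 := start_coord.2
  let x2 := target_coord.1
  let y2 := target_coord.2
  let ax : Int := |x2 - x1|
  let ay : Int := |y2 - y1|
  let dx : Int := (if x2 > x1 then 1 else 0) - (if x2 < x1 then 1 else 0)
  let dy : Int := (if y2 > y1 then 1 else 0) - (if y2 < y1 then 1 else 0)
  let n : Int := max ax ay
  (PySem.List.pyRange 1 n 1).map (fun i => (x1 + dx * min i ax, y1 + dy * min i ay))

-- ===== PRECONDITION & SPEC =====
def Spec_get_path_between_coords (start_coord : Int × Int) (target_coord : Int × Int) (out : List (Int × Int)) : Prop := out = get_path_between_coords_alt start_coord target_coord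
instance (start_coord : Int × Int) (target_coord : Int × Int) (out : List (Int × Int)) : Decidable (Spec_get_path_between_coords start_coord target_coord out) := by unfold Spec_get_path_between_coords; infer_instance

-- ===== CLAIM (what is proved, stated in full; the proofs are below) =====
def Claim_equal_get_path_between_coords : Prop := ∀ (start_coord : Int × Int) (target_coord : Int × Int), Dom_get_path_between_coords start_coord target_coord → Spec_get_path_between_coords start_coord target_coord (get_path_between_coords start_coord target_coord)

-- ===== LEMMAS AND PROOFS =====

-- path[1:-1] on a nonempty list is dropLast of the tail.
theorem pv_slice_one_neg_one {α : Type} (x : α) (l : List α) :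
    PySem.List.slice (x :: l) (some 1) (some (-1)) = l.dropLast := by
  simp [PySem.List.slice, PySem.List.clampIdx, List.dropLast_eq_take]
  split <;> omega

-- Invariant of A's while loop: started at the k-th cell of the line
-- (x1 + dx*min k ax, y1 + dy*min k ay), with fuel ≥ n - k (n = max ax ay), it
-- produces exactly the cells with indices k+1 .. n, in order.
theorem pvLoopA_eq (x1 y1 x2 y2 dx dy ax ay n : Int)
    (hax : ax = x2 - x1 ∨ ax = x1 - x2)
    (hay : ay = y2 - y1 ∨ ay = y1 - y2)
    (hn : n = max ax ay)
    (hdx1 : dx * ax = x2 - x1) (hdx2 : dx = 1 ∨ dx = -1 ∨ dx = 0)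
    (hdy1 : dy * ay = y2 - y1) (hdy2 : dy = 1 ∨ dy = -1 ∨ dy = 0) :
    ∀ (fuel : Nat) (k : Int), 0 ≤ k → n ≤ k + fuel →
      pvLoopA x2 y2 dx dy fuel (x1 + dx * min k ax) (y1 + dy * min k ay) =
        (PySem.List.pyRange (k + 1) (n + 1) 1).map
          (fun i => (x1 + dx * min i ax, y1 + dy * min i ay)) := by
  have hn' : (ax ≤ n ∧ ay ≤ n) ∧ (n = ax ∨ n = ay) := by
    rw [hn]; simp only [max_def]; split_ifs <;> omega
  have hxeq : ∀ k : Int, 0 ≤ k → (x1 + dx * min k ax = x2 ↔ ax ≤ k) := by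
    intro k hk
    rcases hdx2 with h | h | h <;> subst h <;> rcases hax with h' | h' <;>
      simp only [min_def] <;> split_ifs <;> omega
  have hyeq : ∀ k : Int, 0 ≤ k → (y1 + dy * min k ay = y2 ↔ ay ≤ k) := by
    intro k hk
    rcases hdy2 with h | h | h <;> subst h <;> rcases hay with h' | h' <;>
      simp only [min_def] <;> split_ifs <;> omega
  have hxstep : ∀ k : Int, 0 ≤ k →
      (if x1 + dx * min k ax ≠ x2 then x1 + dx * min k ax + dx else x1 + dx * min k ax)
        = x1 + dx * min (k + 1) ax := by
    intro k hk
    rcases hdx2 with h | h | h <;> subst h <;> rcases hax with h' | h' <;>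
      simp only [min_def] <;> split_ifs <;> omega
  have hystep : ∀ k : Int, 0 ≤ k →
      (if y1 + dy * min k ay ≠ y2 then y1 + dy * min k ay + dy else y1 + dy * min k ay)
        = y1 + dy * min (k + 1) ay := by
    intro k hk
    rcases hdy2 with h | h | h <;> subst h <;> rcases hay with h' | h' <;>
      simp only [min_def] <;> split_ifs <;> omega
  intro fuel
  induction fuel with
  | zero =>
    intro k hk hfuel
    have hnk : n ≤ k := by simpa using hfuel
    rw [PySem.List.pyRange_one_eq_nil (by omega)]
    simp [pvLoopA]
  | succ fuel ih =>
    intro k hk hfuel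
    by_cases hend : n ≤ k
    · have h1 : x1 + dx * min k ax = x2 := (hxeq k hk).mpr (by omega)
      have h2 : y1 + dy * min k ay = y2 := (hyeq k hk).mpr (by omega)
      rw [PySem.List.pyRange_one_eq_nil (by omega)]
      simp [pvLoopA, h1, h2]
    · have hne : ¬ (((x1 + dx * min k ax, y1 + dy * min k ay) : Int × Int) = (x2, y2)) := by
        intro hh
        have h1 := (hxeq k hk).mp (congrArg Prod.fst hh)
        have h2 := (hyeq k hk).mp (congrArg Prod.snd hh)
        omega
      rw [PySem.List.pyRange_one_cons (by omega)]
      simp only [pvLoopA, if_neg hne]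
      rw [hxstep k hk, hystep k hk]
      rw [ih (k + 1) (by omega) (by omega)]
      simp

-- ===== VERDICT (by name: the statement is the Claim_ definition above) =====
theorem get_path_between_coords_spec : Claim_equal_get_path_between_coords := by
  intro sc tc _
  unfold Spec_get_path_between_coords
  obtain ⟨x1, y1⟩ := sc
  obtain ⟨x2, y2⟩ := tc
  simp only [get_path_between_coords, get_path_between_coords_alt]
  have hdxeq : (if x2 > x1 then (1:Int) else if x2 < x1 then -1 else 0)
      = (if x2 > x1 then (1:Int) else 0) - (if x2 < x1 then 1 else 0) := by
    split_ifs <;> omega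
  have hdyeq : (if y2 > y1 then (1:Int) else if y2 < y1 then -1 else 0)
      = (if y2 > y1 then (1:Int) else 0) - (if y2 < y1 then 1 else 0) := by
    split_ifs <;> omega
  rw [hdxeq, hdyeq]
  set ax : Int := |x2 - x1| with hax
  set ay : Int := |y2 - y1| with hay
  set dx : Int := (if x2 > x1 then (1:Int) else 0) - (if x2 < x1 then 1 else 0) with hdxd
  set dy : Int := (if y2 > y1 then (1:Int) else 0) - (if y2 < y1 then 1 else 0) with hdyd
  set n : Int := max ax ay with hn
  have hax0 : 0 ≤ ax := abs_nonneg _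
  have hay0 : 0 ≤ ay := abs_nonneg _
  have hax2 : ax = x2 - x1 ∨ ax = x1 - x2 := by
    rw [hax]; rcases abs_choice (x2 - x1) with h | h <;> [left; right] <;> omega
  have hay2 : ay = y2 - y1 ∨ ay = y1 - y2 := by
    rw [hay]; rcases abs_choice (y2 - y1) with h | h <;> [left; right] <;> omega
  have hdx1 : dx * ax = x2 - x1 := by
    rw [hdxd]; rcases hax2 with h | h <;> rw [h] <;> split_ifs <;> omega
  have hdx2 : dx = 1 ∨ dx = -1 ∨ dx = 0 := by
    rw [hdxd]; split_ifs <;> omega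
  have hdy1 : dy * ay = y2 - y1 := by
    rw [hdyd]; rcases hay2 with h | h <;> rw [h] <;> split_ifs <;> omega
  have hdy2 : dy = 1 ∨ dy = -1 ∨ dy = 0 := by
    rw [hdyd]; split_ifs <;> omega
  have hloop := pvLoopA_eq x1 y1 x2 y2 dx dy ax ay n hax2 hay2 hn hdx1 hdx2 hdy1 hdy2
    ((x2 - x1).natAbs + (y2 - y1).natAbs) 0 le_rfl
    (by rcases hax2 with h | h <;> rcases hay2 with h' | h' <;>
        simp only [hn, max_def] <;> split_ifs <;> omega)
  have hmin0x : x1 + dx * min 0 ax = x1 := by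
    have h0 : min 0 ax = 0 := min_eq_left hax0
    rw [h0]; ring
  have hmin0y : y1 + dy * min 0 ay = y1 := by
    have h0 : min 0 ay = 0 := min_eq_left hay0
    rw [h0]; ring
  rw [hmin0x, hmin0y] at hloop
  simp only [zero_add] at hloop
  rw [hloop, pv_slice_one_neg_one, ← List.map_dropLast]
  congr 1
  by_cases h1 : 1 ≤ n
  · rw [PySem.List.pyRange_one_succ_right h1, List.dropLast_concat]
  · have hn0 : n = 0 := by
      rcases hax2 with h | h <;> rcases hay2 with h' | h' <;>
        simp only [hn, max_def] at h1 ⊢ <;> split_ifs at h1 ⊢ <;> omega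
    rw [hn0]
    rw [PySem.List.pyRange_one_eq_nil (by omega), PySem.List.pyRange_one_eq_nil (by omega)]
    simp
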